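-- pv_equiv track=rewrite | github.com/rangp/DTA | PrimitiveSyntaxClassifier.py | _char_occurrences
-- ===== SOURCE A (Python) =====
-- def _char_occurrences(word_list):
--     """
--     Counts the occurrences of characters in a list of words and analyses how often
--     a particular char is used
--     :param word_list: list of words to analyse
--     :return: A dictionary of absolute counts of usage keyed by the character and its order of appearance in each word
--              and a list of characters that are common among all words
--     """
--     char_map, required_characters = {}, []
--     for i, word in enumerate(word_list):
--         chars_in_word_map = {}
--         for i, char in enumerate(word):
--             chars_in_word_map[char] = chars_in_word_map[char] + 1 if char in chars_in_word_map else 1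
--             key = str(chars_in_word_map[char]) + "_" + char
--             char_map[key] = char_map[key] + 1 if key in char_map else 1
--             if char_map[key] == len(word_list):
--                 required_characters.append(key)
--
--     return char_map, required_characters
-- ===== SOURCE B (Python) =====
-- def _char_occurrences(word_list):
--     # Phase 1: count per-word-rank character keys across all words.
--     char_map = {}
--     n_words = len(word_list)
--     for word in word_list:
--         seen = {}
--         for char in word:
--             seen[char] = seen.get(char, 0) + 1
--             key = str(seen[char]) + "_" + char
--             char_map[key] = char_map.get(key, 0) + 1
--     # Phase 2: a key can only be common to all words if it occurs in the last
--     # word; collect the last word's keys (in position order) counted n_words times.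
--     required_characters = []
--     if word_list:
--         seen = {}
--         for char in word_list[-1]:
--             seen[char] = seen.get(char, 0) + 1
--             key = str(seen[char]) + "_" + char
--             if char_map.get(key, 0) == n_words:
--                 required_characters.append(key)
--     return char_map, required_characters
-- ===== Notes on version B (the rewrite author's own statement) =====
-- stated objective: alternative
-- what changed: Splits A's single interleaved count-and-collect loop into a pure counting pass over all words followed by a separate derivation pass over only the last word (a key can reach a count of len(word_list) only there), collecting its keys whose total count equals the number of words.
import Mathlib
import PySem

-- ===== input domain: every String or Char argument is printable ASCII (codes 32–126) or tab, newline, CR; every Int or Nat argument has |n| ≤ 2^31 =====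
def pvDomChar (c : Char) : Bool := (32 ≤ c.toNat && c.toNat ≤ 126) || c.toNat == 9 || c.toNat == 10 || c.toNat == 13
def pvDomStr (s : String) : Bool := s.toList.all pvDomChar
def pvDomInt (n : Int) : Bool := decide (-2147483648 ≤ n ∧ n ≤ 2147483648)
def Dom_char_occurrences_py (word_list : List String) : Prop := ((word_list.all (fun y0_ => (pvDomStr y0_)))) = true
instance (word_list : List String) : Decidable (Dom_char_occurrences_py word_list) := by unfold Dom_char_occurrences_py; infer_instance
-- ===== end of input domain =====

-- B splits A's interleaved count-and-collect loop into a counting pass over all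
-- words plus a separate collection pass over only the last word (alternative
-- decomposition, same cost); proved to return the same value on every input.


-- str(n) + "_" + char: the concatenation is done on the char-list side
-- (PySem.Int.toChars = str(n)), exact for every Int and Char; used by both ports.
def pvKey (n : Int) (c : Char) : String := String.ofList (PySem.Int.toChars n ++ ['_', c])

-- ===== PORT A =====
def char_occurrences_py (word_list : List String) : (List (String × Int)) × List String :=
  let res := word_list.foldl
    (fun (st : PySem.Dict String Int × List String) word =>
      let inner := word.toList.foldl
        (fun (st2 : PySem.Dict Char Int × PySem.Dict String Int × List String) char =>
          -- chars_in_word_map[char] = chars_in_word_map[char] + 1 if char in chars_in_word_map else 1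
          let n : Int := if st2.1.contains char then st2.1.getD char 0 + 1 else 1
          let cw := st2.1.insert char n
          let key := pvKey n char
          -- char_map[key] = char_map[key] + 1 if key in char_map else 1
          let v : Int := if st2.2.1.contains key then st2.2.1.getD key 0 + 1 else 1
          let cm := st2.2.1.insert key v
          let req := if v = (word_list.length : Int) then st2.2.2 ++ [key] else st2.2.2
          (cw, cm, req))
        (PySem.Dict.empty, st.1, st.2)
      (inner.2.1, inner.2.2))
    (PySem.Dict.empty, [])
  (res.1.items, res.2)

-- ===== PORT B =====
def char_occurrences_py_alt (word_list : List String) : (List (String × Int)) × List String :=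
  let n_words : Int := word_list.length
  -- phase 1: counting only
  let char_map := word_list.foldl
    (fun cm word =>
      (word.toList.foldl
        (fun (st : PySem.Dict Char Int × PySem.Dict String Int) char =>
          let n : Int := st.1.getD char 0 + 1
          let key := pvKey n char
          (st.1.insert char n, st.2.insert key (st.2.getD key 0 + 1)))
        (PySem.Dict.empty, cm)).2)
    PySem.Dict.empty
  -- phase 2: `if word_list:` + `word_list[-1]` ported as a match on getLast?
  let required := match word_list.getLast? with
    | none => []
    | some last =>
      (last.toList.foldl
        (fun (st : PySem.Dict Char Int × List String) char =>
          let n : Int := st.1.getD char 0 + 1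
          let key := pvKey n char
          (st.1.insert char n,
            if char_map.getD key 0 = n_words then st.2 ++ [key] else st.2))
        (PySem.Dict.empty, [])).2
  (char_map.items, required)

-- ===== PRECONDITION & SPEC =====
def Spec_char_occurrences_py (word_list : List String) (out : (List (String × Int)) × List String) : Prop := out = char_occurrences_py_alt word_list
instance (word_list : List String) (out : (List (String × Int)) × List String) : Decidable (Spec_char_occurrences_py word_list out) := by unfold Spec_char_occurrences_py; infer_instance

-- ===== CLAIM (what is proved, stated in full; the proofs are below) =====
def Claim_equal_char_occurrences_py : Prop := ∀ (word_list : List String), Dom_char_occurrences_py word_list → Spec_char_occurrences_py word_list (char_occurrences_py word_list)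

-- ===== LEMMAS AND PROOFS =====

-- the per-word key sequence, driven by the running per-character occurrence counter f
def pvKeyList : List Char → (Char → Int) → List String
  | [], _ => []
  | c :: cs, f => pvKey (f c + 1) c :: pvKeyList cs (fun x => if x = c then f c + 1 else f x)

-- counting a list of keys into char_map
def pvCmFold (ks : List String) (cm : PySem.Dict String Int) : PySem.Dict String Int :=
  ks.foldl (fun d k => d.insert k (d.getD k 0 + 1)) cm

-- the keys A appends to required_characters while processing one key sequence
def pvReqNew (N : Int) : List String → PySem.Dict String Int → List String
  | [], _ => []
  | k :: ks, cm =>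
      (if cm.getD k 0 + 1 = N then [k] else []) ++ pvReqNew N ks (cm.insert k (cm.getD k 0 + 1))

def pvWordKeys (w : String) : List String := pvKeyList w.toList (fun _ => 0)

-- phase-1 word-level fold (shared shape of both ports after decomposition)
def pvPhase1 (ws : List String) (cm : PySem.Dict String Int) : PySem.Dict String Int :=
  ws.foldl (fun cm w => pvCmFold (pvWordKeys w) cm) cm

-- `x if cond else 1` where cond is the containment test collapses to getD+1
theorem pv_if_succ {κ : Type} [BEq κ] (d : PySem.Dict κ Int) (k : κ) :
    (if d.contains k then d.getD k 0 + 1 else 1) = d.getD k 0 + 1 := by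
  cases h : d.contains k with
  | false => simp [PySem.Dict.getD_of_not_contains d 0 h]
  | true => simp

theorem pv_digitChar_inj (d e : ℕ) (hd : d < 10) (he : e < 10) (h : Nat.digitChar d = Nat.digitChar e) : d = e := by
  interval_cases d <;> interval_cases e <;> simp_all [Nat.digitChar]

theorem pv_toDigits_ne_nil (n : ℕ) : Nat.toDigits 10 n ≠ [] := by
  rw [Nat.toDigits_eq_if (by norm_num)]
  split <;> simp

theorem pv_toDigits_inj (n m : ℕ) (h : Nat.toDigits 10 n = Nat.toDigits 10 m) : n = m := by
  induction n using Nat.strong_induction_on generalizing m with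
  | _ n ih =>
    rw [Nat.toDigits_eq_if (n := n) (by norm_num : (1:ℕ) < 10),
      Nat.toDigits_eq_if (n := m) (by norm_num : (1:ℕ) < 10)] at h
    by_cases hn : n < 10
    · by_cases hm : m < 10
      · rw [if_pos hn, if_pos hm] at h
        injection h with h1 _
        exact pv_digitChar_inj n m hn hm h1
      · rw [if_pos hn, if_neg hm] at h
        cases hcase : Nat.toDigits 10 (m / 10) with
        | nil => exact absurd hcase (pv_toDigits_ne_nil _)
        | cons a l => rw [hcase] at h; simp at h
    · by_cases hm : m < 10
      · rw [if_neg hn, if_pos hm] at h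
        cases hcase : Nat.toDigits 10 (n / 10) with
        | nil => exact absurd hcase (pv_toDigits_ne_nil _)
        | cons a l => rw [hcase] at h; simp at h
      · rw [if_neg hn, if_neg hm] at h
        have hc : Nat.digitChar (n % 10) = Nat.digitChar (m % 10) := by
          have := congrArg List.getLast? h
          simpa [List.getLast?_concat] using this
        have hpre : Nat.toDigits 10 (n / 10) = Nat.toDigits 10 (m / 10) := by
          have := congrArg List.dropLast h
          simpa [List.dropLast_concat] using this
        have hdiv : n / 10 = m / 10 := ih (n / 10) (by omega) _ hpre
        have hmod : n % 10 = m % 10 := pv_digitChar_inj _ _ (by omega) (by omega) hc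
        omega

theorem pv_key_inj {n m : Int} {c d : Char} (hn : 1 ≤ n) (hm : 1 ≤ m)
    (h : pvKey n c = pvKey m d) : n = m ∧ c = d := by
  unfold pvKey at h
  have h' := String.ofList_inj.mp h
  have hsplit : ∀ (xs : List Char) (a b : Char), xs ++ [a, b] = (xs ++ [a]) ++ [b] := by
    intros; simp
  rw [hsplit, hsplit] at h'
  have hcd : c = d := by
    have := congrArg List.getLast? h'
    simpa [List.getLast?_concat] using this
  have h'' : PySem.Int.toChars n ++ ['_'] = PySem.Int.toChars m ++ ['_'] := by
    have := congrArg List.dropLast h'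
    simpa [List.dropLast_concat] using this
  have h3 : PySem.Int.toChars n = PySem.Int.toChars m := List.append_cancel_right h''
  have hnm : n = m := by
    unfold PySem.Int.toChars at h3
    rw [if_neg (by omega), if_neg (by omega)] at h3
    have := pv_toDigits_inj _ _ h3
    omega
  exact ⟨hnm, hcd⟩

theorem pv_mem_keyList (cs : List Char) : ∀ (f : Char → Int) (k : String),
    k ∈ pvKeyList cs f → ∃ n c, k = pvKey n c ∧ f c + 1 ≤ n := by
  induction cs with
  | nil => intro f k h; simp [pvKeyList] at h
  | cons c cs ih =>
    intro f k h
    simp only [pvKeyList, List.mem_cons] at h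
    rcases h with h | h
    · exact ⟨f c + 1, c, h, le_refl _⟩
    · obtain ⟨n, c', hk, hle⟩ := ih _ k h
      refine ⟨n, c', hk, ?_⟩
      by_cases hcc : c' = c
      · rw [hcc] at hle ⊢
        simp at hle
        omega
      · simpa [hcc] using hle

theorem pv_keyList_nodup (cs : List Char) : ∀ (f : Char → Int), (∀ c, 0 ≤ f c) →
    (pvKeyList cs f).Nodup := by
  induction cs with
  | nil => intro f _; simp [pvKeyList]
  | cons c cs ih =>
    intro f hf
    simp only [pvKeyList, List.nodup_cons]
    constructor
    · intro hmem
      obtain ⟨n, c', hk, hle⟩ := pv_mem_keyList cs _ _ hmem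
      have h1 : (1:Int) ≤ f c + 1 := by have := hf c; omega
      have h2 : (1:Int) ≤ n := by
        by_cases hcc : c' = c
        · rw [hcc] at hle; simp at hle; have := hf c; omega
        · simp [hcc] at hle; have := hf c'; omega
      obtain ⟨hn, hc⟩ := pv_key_inj h1 h2 hk
      rw [← hc] at hle
      simp at hle
      omega
    · refine ih _ (fun x => ?_)
      by_cases hx : x = c
      · have := hf c; simp [hx]; omega
      · simpa [hx] using hf x

-- decomposition of A's inner character loop
theorem pv_innerA_eq (N : Int) (cs : List Char) : ∀ (cw : PySem.Dict Char Int)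
    (cm : PySem.Dict String Int) (req : List String),
    (cs.foldl
      (fun (st2 : PySem.Dict Char Int × PySem.Dict String Int × List String) char =>
        let n : Int := if st2.1.contains char then st2.1.getD char 0 + 1 else 1
        let cw := st2.1.insert char n
        let key := pvKey n char
        let v : Int := if st2.2.1.contains key then st2.2.1.getD key 0 + 1 else 1
        let cm := st2.2.1.insert key v
        let req := if v = N then st2.2.2 ++ [key] else st2.2.2
        (cw, cm, req))
      (cw, cm, req)).2 =
    (pvCmFold (pvKeyList cs (fun c => cw.getD c 0)) cm,
     req ++ pvReqNew N (pvKeyList cs (fun c => cw.getD c 0)) cm) := by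
  induction cs with
  | nil => intro cw cm req; exact Prod.ext_iff.mpr ⟨rfl, (List.append_nil req).symm⟩
  | cons c cs ih =>
    intro cw cm req
    simp only [List.foldl_cons]
    rw [ih]
    rw [pv_if_succ cw c, pv_if_succ cm (pvKey (cw.getD c 0 + 1) c)]
    have hf : (fun x => (cw.insert c (cw.getD c 0 + 1)).getD x 0)
        = (fun x => if x = c then cw.getD c 0 + 1 else cw.getD x 0) := by
      funext x
      rw [PySem.Dict.getD_insert]
    rw [hf]
    simp only [pvKeyList, pvCmFold, pvReqNew, List.foldl_cons]
    split <;> simp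

theorem pv_empty_getD_fun :
    (fun c => (PySem.Dict.empty : PySem.Dict Char Int).getD c 0) = (fun _ : Char => (0:Int)) :=
  funext (fun c => PySem.Dict.getD_empty c 0)

-- the same, started from the empty per-word counter (as both ports do)
theorem pv_innerA_empty (N : Int) (w : String) (cm : PySem.Dict String Int) (req : List String) :
    (w.toList.foldl
      (fun (st2 : PySem.Dict Char Int × PySem.Dict String Int × List String) char =>
        let n : Int := if st2.1.contains char then st2.1.getD char 0 + 1 else 1
        let cw := st2.1.insert char n
        let key := pvKey n char
        let v : Int := if st2.2.1.contains key then st2.2.1.getD key 0 + 1 else 1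
        let cm := st2.2.1.insert key v
        let req := if v = N then st2.2.2 ++ [key] else st2.2.2
        (cw, cm, req))
      (PySem.Dict.empty, cm, req)).2 =
    (pvCmFold (pvWordKeys w) cm, req ++ pvReqNew N (pvWordKeys w) cm) := by
  rw [pv_innerA_eq, pv_empty_getD_fun, pvWordKeys]

-- decomposition of B's phase-1 inner loop
theorem pv_innerB1_eq (cs : List Char) : ∀ (cw : PySem.Dict Char Int) (cm : PySem.Dict String Int),
    (cs.foldl
      (fun (st : PySem.Dict Char Int × PySem.Dict String Int) char =>
        let n : Int := st.1.getD char 0 + 1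
        let key := pvKey n char
        (st.1.insert char n, st.2.insert key (st.2.getD key 0 + 1)))
      (cw, cm)).2 = pvCmFold (pvKeyList cs (fun c => cw.getD c 0)) cm := by
  induction cs with
  | nil => intro cw cm; rfl
  | cons c cs ih =>
    intro cw cm
    simp only [List.foldl_cons]
    rw [ih]
    have hf : (fun x => (cw.insert c (cw.getD c 0 + 1)).getD x 0)
        = (fun x => if x = c then cw.getD c 0 + 1 else cw.getD x 0) := by
      funext x; rw [PySem.Dict.getD_insert]
    rw [hf]
    simp only [pvKeyList, pvCmFold, List.foldl_cons]

theorem pv_innerB1_empty (w : String) (cm : PySem.Dict String Int) :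
    (w.toList.foldl
      (fun (st : PySem.Dict Char Int × PySem.Dict String Int) char =>
        let n : Int := st.1.getD char 0 + 1
        let key := pvKey n char
        (st.1.insert char n, st.2.insert key (st.2.getD key 0 + 1)))
      (PySem.Dict.empty, cm)).2 = pvCmFold (pvWordKeys w) cm := by
  rw [pv_innerB1_eq, pv_empty_getD_fun, pvWordKeys]

-- decomposition of B's phase-2 loop
theorem pv_innerB2_eq (N : Int) (CM : PySem.Dict String Int) (cs : List Char) :
    ∀ (cw : PySem.Dict Char Int) (req : List String),
    (cs.foldl
      (fun (st : PySem.Dict Char Int × List String) char =>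
        let n : Int := st.1.getD char 0 + 1
        let key := pvKey n char
        (st.1.insert char n, if CM.getD key 0 = N then st.2 ++ [key] else st.2))
      (cw, req)).2 =
    req ++ (pvKeyList cs (fun c => cw.getD c 0)).filter (fun k => decide (CM.getD k 0 = N)) := by
  induction cs with
  | nil => intro cw req; exact (List.append_nil req).symm
  | cons c cs ih =>
    intro cw req
    simp only [List.foldl_cons]
    rw [ih]
    have hf : (fun x => (cw.insert c (cw.getD c 0 + 1)).getD x 0)
        = (fun x => if x = c then cw.getD c 0 + 1 else cw.getD x 0) := by
      funext x; rw [PySem.Dict.getD_insert]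
    rw [hf]
    simp only [pvKeyList, List.filter_cons]
    by_cases hc : CM.getD (pvKey (cw.getD c 0 + 1) c) 0 = N <;> simp [hc]

-- no key is collected while its running count stays below N
theorem pv_reqNew_nil (N : Int) (ks : List String) : ∀ (cm : PySem.Dict String Int),
    ks.Nodup → (∀ k ∈ ks, cm.getD k 0 + 1 ≠ N) → pvReqNew N ks cm = [] := by
  induction ks with
  | nil => intro cm _ _; rfl
  | cons k ks ih =>
    intro cm hnd h
    simp only [pvReqNew]
    rw [if_neg (h k (by simp))]
    simp only [List.nil_append]
    refine ih _ (List.Nodup.of_cons hnd) ?_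
    intro k' hk'
    have hne : k' ≠ k := by rintro rfl; exact (List.nodup_cons.mp hnd).1 hk'
    rw [PySem.Dict.getD_insert_of_ne _ _ _ hne]
    exact h k' (by simp [hk'])

-- on a duplicate-free key sequence, A's running check equals B's final-map check
theorem pv_reqNew_filter (N : Int) (ks : List String) : ∀ (cm : PySem.Dict String Int),
    ks.Nodup →
    pvReqNew N ks cm = ks.filter (fun k => decide ((pvCmFold ks cm).getD k 0 = N)) := by
  induction ks with
  | nil => intro cm _; rfl
  | cons k ks ih =>
    intro cm hnd
    have hk_not : k ∉ ks := (List.nodup_cons.mp hnd).1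
    have hfinal : (pvCmFold (k :: ks) cm).getD k 0 = cm.getD k 0 + 1 := by
      simp only [pvCmFold, List.foldl_cons]
      rw [PySem.Dict.getD_foldl_insert_add_one]
      rw [PySem.Dict.getD_insert]
      simp [List.count_eq_zero_of_not_mem hk_not]
    have hstep : pvCmFold (k :: ks) cm = pvCmFold ks (cm.insert k (cm.getD k 0 + 1)) := rfl
    simp only [pvReqNew, List.filter_cons]
    rw [ih (cm.insert k (cm.getD k 0 + 1)) (List.Nodup.of_cons hnd), hfinal, ← hstep]
    by_cases hc : cm.getD k 0 + 1 = N <;> simp [hc]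

-- A's word-level loop collects nothing while fewer than N words are counted
theorem pv_A_words_nil (N : Int) (ws : List String) : ∀ (cm : PySem.Dict String Int)
    (req : List String) (M : Int), (∀ k, cm.getD k 0 ≤ M) → M + ws.length < N →
    ws.foldl (fun st w => (pvCmFold (pvWordKeys w) st.1, st.2 ++ pvReqNew N (pvWordKeys w) st.1))
      (cm, req) = (pvPhase1 ws cm, req) := by
  induction ws with
  | nil => intro cm req M h hN; rfl
  | cons w ws ih =>
    intro cm req M h hN
    simp only [List.foldl_cons]
    simp only [List.length_cons] at hN
    have hnd : (pvWordKeys w).Nodup := pv_keyList_nodup _ _ (fun _ => le_refl 0)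
    have hnil : pvReqNew N (pvWordKeys w) cm = [] := by
      refine pv_reqNew_nil N _ cm hnd ?_
      intro k _
      have := h k
      omega
    rw [hnil, List.append_nil]
    have hstep : ∀ k, (pvCmFold (pvWordKeys w) cm).getD k 0 ≤ M + 1 := by
      intro k
      unfold pvCmFold
      rw [PySem.Dict.getD_foldl_insert_add_one]
      have hcnt : (pvWordKeys w).count k ≤ 1 := by
        rw [List.nodup_iff_count_le_one] at hnd; exact hnd k
      have := h k
      omega
    have := ih _ req (M + 1) hstep (by omega)
    simpa [pvPhase1] using this

-- A's outer loop in word-level form (any start state, any N)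
theorem pv_A_outer (N : Int) (ws : List String) : ∀ (st : PySem.Dict String Int × List String),
    ws.foldl
      (fun (st : PySem.Dict String Int × List String) word =>
        let inner := word.toList.foldl
          (fun (st2 : PySem.Dict Char Int × PySem.Dict String Int × List String) char =>
            let n : Int := if st2.1.contains char then st2.1.getD char 0 + 1 else 1
            let cw := st2.1.insert char n
            let key := pvKey n char
            let v : Int := if st2.2.1.contains key then st2.2.1.getD key 0 + 1 else 1
            let cm := st2.2.1.insert key v
            let req := if v = N then st2.2.2 ++ [key] else st2.2.2
            (cw, cm, req))
          (PySem.Dict.empty, st.1, st.2)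
        (inner.2.1, inner.2.2)) st =
    ws.foldl
      (fun st w => (pvCmFold (pvWordKeys w) st.1, st.2 ++ pvReqNew N (pvWordKeys w) st.1)) st := by
  induction ws with
  | nil => intro st; rfl
  | cons w ws ih =>
    intro st
    simp only [List.foldl_cons]
    rw [← ih]
    congr 1
    have h := pv_innerA_empty N w st.1 st.2
    exact congrArg (fun p => (p.1, p.2)) h

-- B's phase-1 loop in word-level form
theorem pv_B1_outer (ws : List String) : ∀ (cm : PySem.Dict String Int),
    ws.foldl
      (fun cm word =>
        (word.toList.foldl
          (fun (st : PySem.Dict Char Int × PySem.Dict String Int) char =>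
            let n : Int := st.1.getD char 0 + 1
            let key := pvKey n char
            (st.1.insert char n, st.2.insert key (st.2.getD key 0 + 1)))
          (PySem.Dict.empty, cm)).2) cm = pvPhase1 ws cm := by
  induction ws with
  | nil => intro cm; rfl
  | cons w ws ih =>
    intro cm
    simp only [List.foldl_cons, pvPhase1]
    rw [pv_innerB1_empty]
    exact ih _

theorem pv_main (word_list : List String) :
    char_occurrences_py word_list = char_occurrences_py_alt word_list := by
  unfold char_occurrences_py char_occurrences_py_alt
  rw [pv_A_outer (word_list.length : Int) word_list (PySem.Dict.empty, []), pv_B1_outer]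
  rcases List.eq_nil_or_concat word_list with rfl | ⟨init, last, rfl⟩
  · rfl
  · simp only [List.concat_eq_append]
    set N : Int := ((init ++ [last]).length : Int) with hN
    have hNval : N = (init.length : Int) + 1 := by simp [hN]
    have hinit := pv_A_words_nil N init PySem.Dict.empty ([] : List String) 0
      (fun k => le_of_eq (PySem.Dict.getD_empty k 0)) (by omega)
    rw [List.foldl_append, hinit]
    simp only [List.foldl_cons, List.foldl_nil, List.nil_append]
    have hnd : (pvWordKeys last).Nodup := pv_keyList_nodup _ _ (fun _ => le_refl 0)
    have hlast : (init ++ [last]).getLast? = some last := List.getLast?_concat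
    rw [hlast]
    have hphase : pvPhase1 (init ++ [last]) PySem.Dict.empty
        = pvCmFold (pvWordKeys last) (pvPhase1 init PySem.Dict.empty) := by
      simp [pvPhase1, List.foldl_append]
    rw [pv_reqNew_filter N (pvWordKeys last) (pvPhase1 init PySem.Dict.empty) hnd]
    rw [← hphase]
    have h2 := pv_innerB2_eq N (pvPhase1 (init ++ [last]) PySem.Dict.empty) last.toList
      PySem.Dict.empty []
    rw [pv_empty_getD_fun, List.nil_append] at h2
    exact Prod.ext_iff.mpr ⟨rfl, h2.symm⟩

-- ===== VERDICT (by name: the statement is the Claim_ definition above) =====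
theorem char_occurrences_py_spec : Claim_equal_char_occurrences_py := by
  intro word_list _
  unfold Spec_char_occurrences_py
  exact pv_main word_list
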